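-- pv_equiv track=rewrite | github.com/HEIMA-programmer/BOT_0 | backend/app/routes/room_ws.py | _context_round_leader
-- ===== SOURCE A (Python) =====
-- ROUND_DURATION_SECS = 20
--
-- def _context_round_leader(round_answers):
--     best_user_id = None
--     best_signature = None
--
--     for uid, submission in round_answers.items():
--         # Higher correct_count is better; lower response_ms (faster) is better.
--         signature = (
--             submission.get('correct_count', 0),
--             -submission.get('response_ms', ROUND_DURATION_SECS * 1000),
--         )
--         if best_signature is None or signature > best_signature:
--             best_signature = signature
--             best_user_id = uid
--
--     return best_user_id
-- ===== SOURCE B (Python) =====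
-- ROUND_DURATION_SECS = 20
--
-- def _context_round_leader(round_answers):
--     if not round_answers:
--         return None
--     ranked = sorted(
--         round_answers.items(),
--         key=lambda kv: (
--             kv[1].get('correct_count', 0),
--             -kv[1].get('response_ms', ROUND_DURATION_SECS * 1000),
--         ),
--         reverse=True,
--     )
--     return ranked[0][0]
-- ===== Notes on version B (the rewrite author's own statement) =====
-- stated objective: alternative
-- what changed: Replaces the manual best-so-far scan with a stable descending sort on the (correct_count, -response_ms) tuple key and returns the first element's uid; stability with reverse=True reproduces A's first-inserted-wins tie-breaking.
import Mathlib
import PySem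

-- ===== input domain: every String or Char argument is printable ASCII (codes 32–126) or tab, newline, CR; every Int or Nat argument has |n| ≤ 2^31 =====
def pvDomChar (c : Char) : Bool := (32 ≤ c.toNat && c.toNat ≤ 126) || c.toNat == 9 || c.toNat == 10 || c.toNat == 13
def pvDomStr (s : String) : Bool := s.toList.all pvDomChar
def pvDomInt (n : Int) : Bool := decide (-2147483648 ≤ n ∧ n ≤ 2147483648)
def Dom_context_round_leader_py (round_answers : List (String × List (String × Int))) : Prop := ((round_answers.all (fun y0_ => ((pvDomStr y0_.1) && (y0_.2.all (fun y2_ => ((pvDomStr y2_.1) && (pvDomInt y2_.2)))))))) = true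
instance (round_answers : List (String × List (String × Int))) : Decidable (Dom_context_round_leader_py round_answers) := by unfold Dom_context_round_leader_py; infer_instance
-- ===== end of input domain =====

-- B replaces A's best-so-far scan by a stable descending sort on the tuple key and takes the head (alternative decomposition, not faster).

-- shared signature: submission.get('correct_count', 0) and -submission.get('response_ms', ROUND_DURATION_SECS * 1000)
def pvSig1 (sub : List (String × Int)) : Int := PySem.Dict.getD ⟨sub⟩ "correct_count" 0
def pvSig2 (sub : List (String × Int)) : Int := -(PySem.Dict.getD ⟨sub⟩ "response_ms" (20 * 1000))

-- ===== PORT A =====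
def context_round_leader_py (round_answers : List (String × List (String × Int))) : Option String :=
  -- for uid, submission in round_answers.items(): keep (best_user_id, best_signature)
  (round_answers.foldl
    (fun (best : Option String × Option (Int × Int)) kv =>
      let signature : Int × Int := (pvSig1 kv.2, pvSig2 kv.2)
      match best.2 with
      | none => (some kv.1, some signature)
      | some bs =>
          -- Python tuple comparison: signature > best_signature (lexicographic)
          if bs.1 < signature.1 ∨ (bs.1 = signature.1 ∧ bs.2 < signature.2) then
            (some kv.1, some signature)
          else best)
    (none, none)).1

-- ===== PORT B =====
def context_round_leader_py_alt (round_answers : List (String × List (String × Int))) : Option String :=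
  match round_answers with
  | [] => none
  | _ =>
    ((PySem.List.sorted2 round_answers (fun kv => pvSig1 kv.2) (fun kv => pvSig2 kv.2) true).head?).map (·.1)

-- ===== PRECONDITION & SPEC =====
def Spec_context_round_leader_py (round_answers : List (String × List (String × Int))) (out : Option String) : Prop := out = context_round_leader_py_alt round_answers
instance (round_answers : List (String × List (String × Int))) (out : Option String) : Decidable (Spec_context_round_leader_py round_answers out) := by unfold Spec_context_round_leader_py; infer_instance

-- ===== CLAIM (what is proved, stated in full; the proofs are below) =====
def Claim_equal_context_round_leader_py : Prop := ∀ (round_answers : List (String × List (String × Int))), Dom_context_round_leader_py round_answers → Spec_context_round_leader_py round_answers (context_round_leader_py round_answers)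

-- ===== LEMMAS AND PROOFS =====

-- A's loop state as determined by the head of B's partially built sorted list
def pvState (h : Option (String × List (String × Int))) : Option String × Option (Int × Int) :=
  match h with
  | none => (none, none)
  | some p => (some p.1, some (pvSig1 p.2, pvSig2 p.2))

def pvStepA (best : Option String × Option (Int × Int)) (kv : String × List (String × Int)) :
    Option String × Option (Int × Int) :=
  let signature : Int × Int := (pvSig1 kv.2, pvSig2 kv.2)
  match best.2 with
  | none => (some kv.1, some signature)
  | some bs =>
      if bs.1 < signature.1 ∨ (bs.1 = signature.1 ∧ bs.2 < signature.2) then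
        (some kv.1, some signature)
      else best

def pvBefore (a b : String × List (String × Int)) : Bool :=
  decide (pvSig1 b.2 < pvSig1 a.2) || !decide (pvSig1 a.2 < pvSig1 b.2) && decide (pvSig2 b.2 < pvSig2 a.2)

lemma pvStepA_head (acc : List (String × List (String × Int))) (x : String × List (String × Int)) :
    pvStepA (pvState acc.head?) x = pvState (PySem.List.insertBy pvBefore x acc).head? := by
  cases acc with
  | nil => rfl
  | cons y ys =>
    simp only [PySem.List.insertBy, pvStepA, pvState, pvBefore, List.head?]
    by_cases h1 : pvSig1 y.2 < pvSig1 x.2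
    · simp [h1, not_lt.mpr (le_of_lt h1)]
    · by_cases h2 : pvSig1 x.2 < pvSig1 y.2
      · have : ¬ (pvSig1 y.2 = pvSig1 x.2) := by omega
        simp [h1, h2, this]
      · have he : pvSig1 y.2 = pvSig1 x.2 := by omega
        by_cases h3 : pvSig2 y.2 < pvSig2 x.2 <;> simp [h3, he]

lemma pv_loop (xs : List (String × List (String × Int))) :
    ∀ acc : List (String × List (String × Int)),
      xs.foldl pvStepA (pvState acc.head?) =
        pvState ((xs.foldl (fun a x => PySem.List.insertBy pvBefore x a) acc).head?) := by
  induction xs with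
  | nil => intro acc; rfl
  | cons x xs ih =>
    intro acc
    simp only [List.foldl_cons, pvStepA_head acc x]
    exact ih (PySem.List.insertBy pvBefore x acc)

lemma pv_sorted2_eq (xs : List (String × List (String × Int))) :
    PySem.List.sorted2 xs (fun kv => pvSig1 kv.2) (fun kv => pvSig2 kv.2) true =
      xs.foldl (fun a x => PySem.List.insertBy pvBefore x a) [] := rfl

-- ===== VERDICT (by name: the statement is the Claim_ definition above) =====
theorem context_round_leader_py_spec : Claim_equal_context_round_leader_py := by
  intro ra _
  unfold Spec_context_round_leader_py context_round_leader_py context_round_leader_py_alt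
  cases ra with
  | nil => rfl
  | cons x xs =>
    rw [pv_sorted2_eq]
    show ((x :: xs).foldl pvStepA
      (pvState ([] : List (String × List (String × Int))).head?)).1 = _
    rw [pv_loop (x :: xs) []]
    cases hh : ((x :: xs).foldl (fun a x => PySem.List.insertBy pvBefore x a) []).head? <;>
      simp [pvState, hh]
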